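-- pv_equiv track=rewrite | github.com/HwangHanJae/coding_test_pratice | 프로그래머스/힙(Heap)/더 맵게/code.py | solution
-- ===== SOURCE A (Python) =====
-- import heapq
--
-- def solution(scoville, K):
--     count = 0
--     heapq.heapify(scoville)
--     while True:
--         a = heapq.heappop(scoville)
--         if a >= K:
--             return count
--         if len(scoville) < 1:
--             return -1
--         b = heapq.heappop(scoville)
--         c = a + (b * 2)
--         heapq.heappush(scoville, c)
--         count += 1
-- ===== SOURCE B (Python) =====
-- def solution(scoville, K):
--     xs = list(scoville)
--     count = 0
--     while True:
--         a = min(xs)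
--         if a >= K:
--             return count
--         if len(xs) < 2:
--             return -1
--         xs.remove(a)
--         b = min(xs)
--         xs.remove(b)
--         xs.append(a + 2 * b)
--         count += 1
-- ===== Notes on version B (the rewrite author's own statement) =====
-- stated objective: simpler
-- what changed: Replaces the binary heap (heapify/heappop/heappush) by a plain list with repeated linear min-scans: find the minimum, remove one occurrence of it and of the second minimum, append a+2*b; no maintained ordering structure.
import Mathlib
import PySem

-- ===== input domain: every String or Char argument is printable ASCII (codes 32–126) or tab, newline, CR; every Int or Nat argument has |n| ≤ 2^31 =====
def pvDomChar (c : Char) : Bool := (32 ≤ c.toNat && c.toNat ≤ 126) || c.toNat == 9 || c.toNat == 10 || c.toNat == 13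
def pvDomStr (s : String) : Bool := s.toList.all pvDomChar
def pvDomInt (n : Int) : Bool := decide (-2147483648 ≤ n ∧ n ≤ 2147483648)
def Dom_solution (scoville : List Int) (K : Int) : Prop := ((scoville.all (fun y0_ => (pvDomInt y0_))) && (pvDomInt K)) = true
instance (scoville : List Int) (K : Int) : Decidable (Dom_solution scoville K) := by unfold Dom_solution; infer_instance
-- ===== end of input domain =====

-- B replaces A's binary heap by repeated linear min-scans on a plain list (objective: simpler).
-- Python A mutates its argument in place (heapify/pop/push); B does not — the equivalence proved here is about the return value only.

-- ===== PORT A =====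
-- A calls the heapq library; PySem has no heap, so heapq is ported by hand below,
-- step for step after CPython's pure-Python heapq (_siftdown, _siftup, heapify,
-- heappop, heappush); exact for int elements.

-- list read `heap[i]` (all reads are in range when reached; default never observed)
def hpGet (h : List Int) (i : Nat) : Int := h.getD i 0

-- CPython heapq._siftdown(heap, startpos, pos) with newitem = the value destined for the hole
-- at pos; the fuel argument (pos strictly decreases each iteration, so pos iterations suffice)
-- only makes the loop structurally recursive and is never exhausted early.
def hpSiftdownGo : Nat → List Int → Nat → Nat → Int → List Int
  | 0, h, _, pos, newitem => h.set pos newitem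
  | fuel + 1, h, start, pos, newitem =>
    if start < pos then
      let parentpos := (pos - 1) / 2
      let parent := hpGet h parentpos
      if newitem < parent then hpSiftdownGo fuel (h.set pos parent) start parentpos newitem
      else h.set pos newitem
    else h.set pos newitem

def hpSiftdown (h : List Int) (start pos : Nat) (newitem : Int) : List Int :=
  hpSiftdownGo pos h start pos newitem

-- CPython heapq._siftup(heap, pos) with newitem = the value destined for the hole at pos;
-- fuel (the descent makes pos at least 2*pos+1, so len(heap) iterations suffice) only makes
-- the loop structurally recursive and is never exhausted early.
def hpSiftupGo : Nat → List Int → Nat → Nat → Int → List Int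
  | 0, h, start, pos, newitem => hpSiftdown h start pos newitem
  | fuel + 1, h, start, pos, newitem =>
    let endpos := h.length
    let childpos := 2 * pos + 1
    if childpos < endpos then
      let c := if childpos + 1 < endpos ∧ ¬ hpGet h childpos < hpGet h (childpos + 1)
               then childpos + 1 else childpos
      hpSiftupGo fuel (h.set pos (hpGet h c)) start c newitem
    else hpSiftdown h start pos newitem

def hpSiftup (h : List Int) (start pos : Nat) (newitem : Int) : List Int :=
  hpSiftupGo h.length h start pos newitem

-- _siftup as called: newitem = heap[pos]
def hpSiftupTop (h : List Int) (pos : Nat) : List Int := hpSiftup h pos pos (hpGet h pos)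

-- `for i in reversed(range(n//2)): _siftup(heap, i)`
def hpHeapifyGo (h : List Int) : Nat → List Int
  | 0 => h
  | i + 1 => hpHeapifyGo (hpSiftupTop h i) i

def hpHeapify (h : List Int) : List Int := hpHeapifyGo h (h.length / 2)

-- heappop: raises IndexError on [] (none); else pops last, moves it to the root, sifts up
def hpPop (h : List Int) : Option (Int × List Int) :=
  match h with
  | [] => none
  | _ :: _ =>
    let lastelt := h.getLastD 0
    let rest := h.dropLast
    if rest.isEmpty then some (lastelt, [])
    else some (hpGet rest 0, hpSiftupTop (rest.set 0 lastelt) 0)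

def hpPush (h : List Int) (x : Int) : List Int := hpSiftdown (h ++ [x]) 0 h.length x

-- the `while True` loop of A; the `none` branches are unreachable under Pre_ (Python raises
-- IndexError there); fuel (each iteration shortens the heap by one, so len(heap) iterations
-- suffice) only makes the loop structurally recursive and is never exhausted early.
def solutionLoopGo : Nat → List Int → Int → Int → Int
  | 0, _, _, _ => 0
  | fuel + 1, h, K, count =>
    match hpPop h with
    | none => 0
    | some (a, h1) =>
      if a ≥ K then count
      else if h1.length < 1 then -1
      else
        match hpPop h1 with
        | none => 0
        | some (b, h2) =>
          solutionLoopGo fuel (hpPush h2 (a + b * 2)) K (count + 1)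

def solutionLoop (h : List Int) (K count : Int) : Int := solutionLoopGo h.length h K count

def solution (scoville : List Int) (K : Int) : Int := solutionLoop (hpHeapify scoville) K 0

-- ===== PORT B =====

-- the `while True` loop of B; `none` branches unreachable (min([]) raises; removed values are
-- members); fuel (each iteration shortens the list by one) only makes the loop structurally
-- recursive and is never exhausted early.
def altLoopGo : Nat → List Int → Int → Int → Int
  | 0, _, _, _ => 0
  | fuel + 1, xs, K, count =>
    match PySem.List.min? xs (fun x => x) with
    | none => 0
    | some a =>
      if a ≥ K then count
      else if xs.length < 2 then -1
      else
        match PySem.List.remove? xs a with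
        | none => 0
        | some ys =>
          match PySem.List.min? ys (fun x => x) with
          | none => 0
          | some b =>
            match PySem.List.remove? ys b with
            | none => 0
            | some zs => altLoopGo fuel (zs ++ [a + 2 * b]) K (count + 1)

def altLoop (xs : List Int) (K count : Int) : Int := altLoopGo xs.length xs K count

def solution_alt (scoville : List Int) (K : Int) : Int := altLoop scoville K 0

-- ===== PRECONDITION & SPEC =====
-- Pre_ excludes only the empty list, on which Python A raises IndexError (heappop of an empty heap).
def Pre_solution (scoville : List Int) (K : Int) : Prop := scoville ≠ []
instance (scoville : List Int) (K : Int) : Decidable (Pre_solution scoville K) := by unfold Pre_solution; infer_instance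
def pvWitness_solution : List Int × Int := ([1, 2, 3, 9, 10, 12], 7)

def Spec_solution (scoville : List Int) (K : Int) (out : Int) : Prop := out = solution_alt scoville K
instance (scoville : List Int) (K : Int) (out : Int) : Decidable (Spec_solution scoville K out) := by unfold Spec_solution; infer_instance

-- ===== CLAIM (what is proved, stated in full; the proofs are below) =====
def Claim_equal_solution : Prop := ∀ (scoville : List Int) (K : Int), Dom_solution scoville K → Pre_solution scoville K → Spec_solution scoville K (solution scoville K)

-- ===== LEMMAS AND PROOFS =====

theorem length_hpSiftdownGo (fuel : Nat) : ∀ (h : List Int) (start pos : Nat) (x : Int),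
    (hpSiftdownGo fuel h start pos x).length = h.length := by
  induction fuel with
  | zero => intro h start pos x; simp [hpSiftdownGo]
  | succ fuel ih =>
    intro h start pos x
    rw [hpSiftdownGo]
    dsimp only
    split
    · split
      · rw [ih]; simp
      · simp
    · simp

theorem length_hpSiftdown (h : List Int) (start pos : Nat) (x : Int) :
    (hpSiftdown h start pos x).length = h.length := length_hpSiftdownGo pos h start pos x

theorem length_hpSiftupGo (fuel : Nat) : ∀ (h : List Int) (start pos : Nat) (x : Int),
    (hpSiftupGo fuel h start pos x).length = h.length := by
  induction fuel with
  | zero => intro h start pos x; simp [hpSiftupGo, length_hpSiftdown]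
  | succ fuel ih =>
    intro h start pos x
    rw [hpSiftupGo]
    dsimp only
    split
    · rw [ih]; simp
    · simp [length_hpSiftdown]

theorem length_hpSiftup (h : List Int) (start pos : Nat) (x : Int) :
    (hpSiftup h start pos x).length = h.length := length_hpSiftupGo h.length h start pos x

theorem length_hpPop (h : List Int) (a : Int) (h' : List Int) (hp : hpPop h = some (a, h')) :
    h'.length + 1 = h.length := by
  cases h with
  | nil => simp [hpPop] at hp
  | cons x t =>
    simp only [hpPop] at hp
    split at hp <;> simp_all [hpSiftupTop, length_hpSiftup]
    · cases t <;> simp_all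
    · rw [← hp.2, length_hpSiftup]; simp

theorem length_hpPush (h : List Int) (x : Int) : (hpPush h x).length = h.length + 1 := by
  simp [hpPush, length_hpSiftdown]

-- parent index
def hpPar (j : Nat) : Nat := (j - 1) / 2

-- j lies in the subtree rooted at s
def hpInS (s j : Nat) : Bool :=
  if j = s then true else if j ≤ s then false else hpInS s (hpPar j)
termination_by j
decreasing_by simp [hpPar]; have := Nat.div_le_self (j - 1) 2; omega

theorem hpInS_le {s j : Nat} (h : hpInS s j = true) : s ≤ j := by
  fun_induction hpInS s j <;> simp_all <;> omega

theorem hpInS_self (s : Nat) : hpInS s s = true := by rw [hpInS]; simp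

theorem hpInS_par {s j : Nat} (h : hpInS s j = true) (hne : j ≠ s) : hpInS s (hpPar j) = true := by
  rw [hpInS] at h
  simp only [hne, if_false] at h
  split at h
  · cases h
  · exact h

theorem hpInS_child {s j c : Nat} (h : hpInS s j = true) (hc : hpPar c = j) (hgt : s < c) :
    hpInS s c = true := by
  rw [hpInS, if_neg (by omega), if_neg (by omega), hc]
  exact h

theorem hpInS_zero (j : Nat) : hpInS 0 j = true := by
  fun_induction hpInS 0 j <;> simp_all

-- heap order below level i: every edge whose parent index is ≥ i is ordered
def PartialHeap (h : List Int) (i : Nat) : Prop :=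
  ∀ j, 0 < j → j < h.length → i ≤ hpPar j → hpGet h (hpPar j) ≤ hpGet h j

def IsHeap (h : List Int) : Prop := PartialHeap h 0

theorem hpGet_set_self (h : List Int) (i : Nat) (hi : i < h.length) (a : Int) :
    hpGet (h.set i a) i = a := by
  simp [hpGet, List.getD_eq_getElem?_getD, List.getElem?_set_self, hi]

theorem hpGet_set_ne (h : List Int) (i j : Nat) (hne : j ≠ i) (a : Int) :
    hpGet (h.set i a) j = hpGet h j := by
  simp [hpGet, List.getD_eq_getElem?_getD, List.getElem?_set_ne (Ne.symm hne)]

theorem mset_set (h : List Int) (i : Nat) (hi : i < h.length) (a : Int) :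
    (↑(h.set i a) : Multiset Int) + {hpGet h i} = ↑h + {a} := by
  have e1 : h.set i a = h.take i ++ a :: h.drop (i+1) := by
    rw [List.set_eq_take_append_cons_drop, if_pos hi]
  have e2 : h = h.take i ++ h[i] :: h.drop (i+1) := by
    rw [List.getElem_cons_drop hi, List.take_append_drop]
  rw [hpGet, List.getD_eq_getElem _ _ hi, e1]
  conv_rhs => rw [e2]
  simp only [← Multiset.cons_coe, ← Multiset.coe_add]
  simp [← Multiset.singleton_add]
  abel

theorem hpPar_lt {j : Nat} (hj : 0 < j) : hpPar j < j := by
  simp only [hpPar]; have := Nat.div_le_self (j - 1) 2; omega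

theorem ne_of_inS {s p k : Nat} (hp : hpInS s p = true) (hk : hpInS s k = false) : k ≠ p := by
  intro e; rw [e, hp] at hk; cases hk

-- children of p are exactly 2p+1 and 2p+2
theorem hpPar_children {p j : Nat} (hj : 0 < j) (h : hpPar j = p) : j = 2 * p + 1 ∨ j = 2 * p + 2 := by
  simp [hpPar] at h; omega

-- ==== siftdown spec ====
-- terminal write: the hole at p receives x
theorem hpSet_spec (h : List Int) (s p : Nat) (x : Int)
    (hp : p < h.length) (hps : hpInS s p = true)
    (A : ∀ j, 0 < j → j < h.length → hpInS s (hpPar j) = true → j ≠ p → hpPar j ≠ p →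
        hpGet h (hpPar j) ≤ hpGet h j)
    (B1 : ∀ j, 0 < j → j < h.length → hpPar j = p → x ≤ hpGet h j)
    (hstop : p ≠ s → hpGet h (hpPar p) ≤ x) :
    (∀ j, 0 < j → j < h.length → hpInS s (hpPar j) = true →
        hpGet (h.set p x) (hpPar j) ≤ hpGet (h.set p x) j) ∧
    (∀ k, hpInS s k = false → hpGet (h.set p x) k = hpGet h k) ∧
    (↑(h.set p x) : Multiset Int) + {hpGet h p} = ↑h + {x} := by
  refine ⟨?_, ?_, mset_set h p hp x⟩
  · intro j hj hjl hin
    by_cases hjp : j = p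
    · subst hjp
      rw [hpGet_set_self h j hp, hpGet_set_ne h j (hpPar j) (by have := hpPar_lt hj; omega)]
      by_cases hpse : j = s
      · exfalso
        have h1 : hpPar j < j := hpPar_lt hj
        have := hpInS_le hin
        omega
      · exact hstop hpse
    · rw [hpGet_set_ne h p j hjp]
      by_cases hcp : hpPar j = p
      · rw [hcp, hpGet_set_self h p hp]
        exact B1 j hj hjl hcp
      · rw [hpGet_set_ne h p _ hcp]
        exact A j hj hjl hin hjp hcp
  · intro k hk
    rw [hpGet_set_ne h p k (ne_of_inS hps hk)]

theorem hpSiftdownGo_spec (fuel : Nat) : ∀ (h : List Int) (s p : Nat) (x : Int),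
    p ≤ fuel → p < h.length → hpInS s p = true →
    (∀ j, 0 < j → j < h.length → hpInS s (hpPar j) = true → j ≠ p → hpPar j ≠ p →
        hpGet h (hpPar j) ≤ hpGet h j) →
    (∀ j, 0 < j → j < h.length → hpPar j = p → x ≤ hpGet h j) →
    (∀ j, 0 < j → j < h.length → hpPar j = p → p ≠ s → hpGet h (hpPar p) ≤ hpGet h j) →
    (∀ j, 0 < j → j < h.length → hpInS s (hpPar j) = true →
        hpGet (hpSiftdownGo fuel h s p x) (hpPar j) ≤ hpGet (hpSiftdownGo fuel h s p x) j) ∧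
    (∀ k, hpInS s k = false → hpGet (hpSiftdownGo fuel h s p x) k = hpGet h k) ∧
    (↑(hpSiftdownGo fuel h s p x) : Multiset Int) + {hpGet h p} = ↑h + {x} := by
  induction fuel with
  | zero =>
    intro h s p x hfuel hp hps A B1 B2
    have hs0 : p = s := by have := hpInS_le hps; omega
    exact hpSet_spec h s p x hp hps A B1 (fun hne => absurd hs0 hne)
  | succ fuel ih =>
    intro h s p x hfuel hp hps A B1 B2
    by_cases hsp : s < p
    · by_cases hlt : x < hpGet h ((p - 1) / 2)
      · -- recursive case: move parent down into the hole, hole moves to parentpos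
        have heq : hpSiftdownGo (fuel + 1) h s p x
            = hpSiftdownGo fuel (h.set p (hpGet h ((p - 1) / 2))) s ((p - 1) / 2) x := by
          rw [hpSiftdownGo]; simp only [if_pos hsp, if_pos hlt]
        set pp := (p - 1) / 2 with hpp
        have hppp : pp = hpPar p := by simp [hpPar, hpp]
        have hplt : pp < p := by rw [hppp]; exact hpPar_lt (by omega)
        set h' := h.set p (hpGet h pp) with hh'
        have hlen : h'.length = h.length := by simp [hh']
        have g_ne : ∀ j, j ≠ p → hpGet h' j = hpGet h j := fun j hj => hpGet_set_ne h p j hj _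
        have g_p : hpGet h' p = hpGet h pp := hpGet_set_self h p hp _
        have hps' : hpInS s pp = true := by rw [hppp]; exact hpInS_par hps (by omega)
        have A' : ∀ j, 0 < j → j < h'.length → hpInS s (hpPar j) = true → j ≠ pp → hpPar j ≠ pp →
            hpGet h' (hpPar j) ≤ hpGet h' j := by
          intro j hj hjl hin hjne hpne
          rw [hlen] at hjl
          have hjp : j ≠ p := by intro e; rw [e] at hpne; exact hpne hppp.symm
          rw [g_ne j hjp]
          by_cases hcp : hpPar j = p
          · rw [hcp, g_p]
            exact B2 j hj hjl hcp (by omega)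
          · rw [g_ne _ hcp]
            exact A j hj hjl hin hjp hcp
        have B1' : ∀ j, 0 < j → j < h'.length → hpPar j = pp → x ≤ hpGet h' j := by
          intro j hj hjl hc
          rw [hlen] at hjl
          by_cases hjp : j = p
          · rw [hjp, g_p]; exact le_of_lt hlt
          · rw [g_ne j hjp]
            have hAj : hpGet h (hpPar j) ≤ hpGet h j :=
              A j hj hjl (by rw [hc]; exact hps') hjp (by rw [hc]; omega)
            rw [hc] at hAj
            exact le_trans (le_of_lt hlt) hAj
        have B2' : ∀ j, 0 < j → j < h'.length → hpPar j = pp → pp ≠ s →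
            hpGet h' (hpPar pp) ≤ hpGet h' j := by
          intro j hj hjl hc hne
          rw [hlen] at hjl
          have hpps : 0 < pp := by have := hpInS_le hps'; omega
          have hgpp : hpPar pp < pp := hpPar_lt hpps
          have hA_pp : hpGet h (hpPar pp) ≤ hpGet h pp := by
            refine A pp hpps (by omega) ?_ (by omega) (by omega)
            · exact hpInS_par hps' hne
          rw [g_ne _ (by omega)]
          by_cases hjp : j = p
          · rw [hjp, g_p]; exact hA_pp
          · rw [g_ne j hjp]
            have hAj : hpGet h (hpPar j) ≤ hpGet h j :=
              A j hj hjl (by rw [hc]; exact hps') hjp (by rw [hc]; omega)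
            rw [hc] at hAj
            exact le_trans hA_pp hAj
        obtain ⟨ra, rb, rc⟩ := ih h' s pp x (by omega) (by omega) hps' A' B1' B2'
        rw [hlen] at ra
        refine ⟨by rw [heq]; exact ra, ?_, ?_⟩
        · intro k hk
          rw [heq, rb k hk, g_ne k (ne_of_inS hps hk)]
        · rw [g_ne pp (by omega)] at rc
          have ms : (↑h' : Multiset Int) + {hpGet h p} = ↑h + {hpGet h pp} := mset_set h p hp _
          have key : ((↑(hpSiftdownGo (fuel + 1) h s p x) : Multiset Int) + {hpGet h p}) + {hpGet h pp}
              = (↑h + {x}) + {hpGet h pp} := by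
            calc (↑(hpSiftdownGo (fuel + 1) h s p x) : Multiset Int) + {hpGet h p} + {hpGet h pp}
                = (↑(hpSiftdownGo (fuel + 1) h s p x) + {hpGet h pp}) + {hpGet h p} := by abel
              _ = (↑h' + {x}) + {hpGet h p} := by rw [heq, rc]
              _ = (↑h' + {hpGet h p}) + {x} := by abel
              _ = (↑h + {hpGet h pp}) + {x} := by rw [ms]
              _ = (↑h + {x}) + {hpGet h pp} := by abel
          exact add_right_cancel key
      · -- stop: parent already ≤ newitem; write newitem at the hole
        have heq : hpSiftdownGo (fuel + 1) h s p x = h.set p x := by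
          rw [hpSiftdownGo]; simp only [if_pos hsp, if_neg hlt]
        rw [heq]
        refine hpSet_spec h s p x hp hps A B1 ?_
        intro _
        have : hpPar p = (p - 1) / 2 := rfl
        rw [this]; omega
    · -- pos = start: write newitem at the hole
      have hes : p = s := by have := hpInS_le hps; omega
      have heq : hpSiftdownGo (fuel + 1) h s p x = h.set p x := by
        rw [hpSiftdownGo]; simp only [if_neg hsp]
      rw [heq]
      exact hpSet_spec h s p x hp hps A B1 (fun hne => absurd hes hne)

theorem hpSiftdown_spec (h : List Int) (s p : Nat) (x : Int)
    (hp : p < h.length) (hps : hpInS s p = true)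
    (A : ∀ j, 0 < j → j < h.length → hpInS s (hpPar j) = true → j ≠ p → hpPar j ≠ p →
        hpGet h (hpPar j) ≤ hpGet h j)
    (B1 : ∀ j, 0 < j → j < h.length → hpPar j = p → x ≤ hpGet h j)
    (B2 : ∀ j, 0 < j → j < h.length → hpPar j = p → p ≠ s → hpGet h (hpPar p) ≤ hpGet h j) :
    (∀ j, 0 < j → j < h.length → hpInS s (hpPar j) = true →
        hpGet (hpSiftdown h s p x) (hpPar j) ≤ hpGet (hpSiftdown h s p x) j) ∧
    (∀ k, hpInS s k = false → hpGet (hpSiftdown h s p x) k = hpGet h k) ∧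
    (↑(hpSiftdown h s p x) : Multiset Int) + {hpGet h p} = ↑h + {x} :=
  hpSiftdownGo_spec p h s p x (le_refl p) hp hps A B1 B2

-- ==== siftup spec ====
-- leaf case: the hole has no children; hand it to siftdown
theorem hpSiftupLeaf_spec (h : List Int) (s p : Nat) (x : Int)
    (hp : p < h.length) (hps : hpInS s p = true) (hcc : ¬ 2 * p + 1 < h.length)
    (A : ∀ j, 0 < j → j < h.length → hpInS s (hpPar j) = true → j ≠ p → hpPar j ≠ p →
        hpGet h (hpPar j) ≤ hpGet h j) :
    (∀ j, 0 < j → j < h.length → hpInS s (hpPar j) = true →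
        hpGet (hpSiftdown h s p x) (hpPar j) ≤ hpGet (hpSiftdown h s p x) j) ∧
    (∀ k, hpInS s k = false → hpGet (hpSiftdown h s p x) k = hpGet h k) ∧
    (↑(hpSiftdown h s p x) : Multiset Int) + {hpGet h p} = ↑h + {x} := by
  have hch : ∀ j, 0 < j → j < h.length → hpPar j ≠ p := by
    intro j hj hjl hpar
    rcases hpPar_children hj hpar with e | e <;> omega
  exact hpSiftdown_spec h s p x hp hps A
    (fun j hj hjl hpar => absurd hpar (hch j hj hjl))
    (fun j hj hjl hpar _ => absurd hpar (hch j hj hjl))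

theorem hpSiftupGo_spec (fuel : Nat) : ∀ (h : List Int) (s p : Nat) (x : Int),
    h.length ≤ fuel + p → p < h.length → hpInS s p = true →
    (∀ j, 0 < j → j < h.length → hpInS s (hpPar j) = true → j ≠ p → hpPar j ≠ p →
        hpGet h (hpPar j) ≤ hpGet h j) →
    (∀ j, 0 < j → j < h.length → hpPar j = p → p ≠ s → hpGet h (hpPar p) ≤ hpGet h j) →
    (∀ j, 0 < j → j < h.length → hpInS s (hpPar j) = true →
        hpGet (hpSiftupGo fuel h s p x) (hpPar j) ≤ hpGet (hpSiftupGo fuel h s p x) j) ∧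
    (∀ k, hpInS s k = false → hpGet (hpSiftupGo fuel h s p x) k = hpGet h k) ∧
    (↑(hpSiftupGo fuel h s p x) : Multiset Int) + {hpGet h p} = ↑h + {x} := by
  induction fuel with
  | zero =>
    intro h s p x hfuel hp hps A C
    exact hpSiftupLeaf_spec h s p x hp hps (by omega) A
  | succ fuel ih =>
    intro h s p x hfuel hp hps A C
    by_cases hcc : 2 * p + 1 < h.length
    · -- descend: move the smaller child up into the hole
      set c0 := 2 * p + 1 with hc0
      have step : ∀ (c' : Nat),
          hpSiftupGo (fuel + 1) h s p x = hpSiftupGo fuel (h.set p (hpGet h c')) s c' x →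
          c' < h.length → hpPar c' = p → p < c' → c' ≤ 2 * p + 2 →
          (∀ j, 0 < j → j < h.length → hpPar j = p → hpGet h c' ≤ hpGet h j) →
          (∀ j, 0 < j → j < h.length → hpInS s (hpPar j) = true →
              hpGet (hpSiftupGo (fuel + 1) h s p x) (hpPar j) ≤ hpGet (hpSiftupGo (fuel + 1) h s p x) j) ∧
          (∀ k, hpInS s k = false → hpGet (hpSiftupGo (fuel + 1) h s p x) k = hpGet h k) ∧
          (↑(hpSiftupGo (fuel + 1) h s p x) : Multiset Int) + {hpGet h p} = ↑h + {x} := by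
        intro c' heq hc'l hc'p hpc' hc'le hmin
        set h' := h.set p (hpGet h c') with hh'
        have hlen : h'.length = h.length := by simp [hh']
        have g_ne : ∀ j, j ≠ p → hpGet h' j = hpGet h j := fun j hj => hpGet_set_ne h p j hj _
        have g_p : hpGet h' p = hpGet h c' := hpGet_set_self h p hp _
        have hps' : hpInS s c' = true := by
          refine hpInS_child hps hc'p ?_
          have := hpInS_le hps; omega
        have A' : ∀ j, 0 < j → j < h'.length → hpInS s (hpPar j) = true → j ≠ c' → hpPar j ≠ c' →
            hpGet h' (hpPar j) ≤ hpGet h' j := by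
          intro j hj hjl hin hjne hpne
          rw [hlen] at hjl
          by_cases hjp : j = p
          · subst hjp
            have hsle : s ≤ hpPar j := hpInS_le hin
            have hlt2 : hpPar j < j := hpPar_lt hj
            rw [g_p, g_ne _ (by omega)]
            exact C c' (by omega) hc'l hc'p (by omega)
          · rw [g_ne j hjp]
            by_cases hcp : hpPar j = p
            · rw [hcp, g_p]
              exact hmin j hj hjl hcp
            · rw [g_ne _ hcp]
              exact A j hj hjl hin hjp hcp
        have C' : ∀ j, 0 < j → j < h'.length → hpPar j = c' → c' ≠ s →
            hpGet h' (hpPar c') ≤ hpGet h' j := by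
          intro j hj hjl hc _
          rw [hlen] at hjl
          have hjc : c' < j := by
            have : hpPar j < j := hpPar_lt hj
            omega
          rw [hc'p, g_p, g_ne j (by omega)]
          have hAj : hpGet h (hpPar j) ≤ hpGet h j :=
            A j hj hjl (by rw [hc]; exact hps') (by omega) (by rw [hc]; omega)
          rw [hc] at hAj
          exact hAj
        obtain ⟨ra, rb, rc⟩ := ih h' s c' x (by omega) (by omega) hps' A' C'
        rw [hlen] at ra
        refine ⟨by rw [heq]; exact ra, ?_, ?_⟩
        · intro k hk
          rw [heq, rb k hk, g_ne k (ne_of_inS hps hk)]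
        · rw [g_ne c' (by omega)] at rc
          have ms : (↑h' : Multiset Int) + {hpGet h p} = ↑h + {hpGet h c'} := mset_set h p hp _
          have key : ((↑(hpSiftupGo (fuel + 1) h s p x) : Multiset Int) + {hpGet h p}) + {hpGet h c'}
              = (↑h + {x}) + {hpGet h c'} := by
            calc (↑(hpSiftupGo (fuel + 1) h s p x) : Multiset Int) + {hpGet h p} + {hpGet h c'}
                = (↑(hpSiftupGo (fuel + 1) h s p x) + {hpGet h c'}) + {hpGet h p} := by abel
              _ = (↑h' + {x}) + {hpGet h p} := by rw [heq, rc]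
              _ = (↑h' + {hpGet h p}) + {x} := by abel
              _ = (↑h + {hpGet h c'}) + {x} := by rw [ms]
              _ = (↑h + {x}) + {hpGet h c'} := by abel
          exact add_right_cancel key
      by_cases hcond : c0 + 1 < h.length ∧ ¬ hpGet h c0 < hpGet h (c0 + 1)
      · refine step (c0 + 1) ?_ (by omega) (by simp [hpPar]; omega) (by omega) (by omega) ?_
        · rw [hpSiftupGo]; simp only [← hc0, if_pos hcc, if_pos hcond]
        · intro j hj hjl hpar
          rcases hpPar_children hj hpar with e | e
          · rw [e, ← hc0]
            have := hcond.2
            omega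
          · rw [e]
      · refine step c0 ?_ (by omega) (by simp [hpPar]; omega) (by omega) (by omega) ?_
        · rw [hpSiftupGo]; simp only [← hc0, if_pos hcc, if_neg hcond]
        · intro j hj hjl hpar
          rcases hpPar_children hj hpar with e | e
          · rw [e, ← hc0]
          · rw [e]
            have hr : c0 + 1 = 2 * p + 2 := by omega
            rw [← hr] at *
            have hlt2 : hpGet h c0 < hpGet h (c0 + 1) := by
              rcases Classical.em (c0 + 1 < h.length) with hl | hl
              · by_contra hcon
                exact hcond ⟨hl, by omega⟩
              · omega
            omega
    · -- leaf: hand the hole to siftdown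
      have heq : hpSiftupGo (fuel + 1) h s p x = hpSiftdown h s p x := by
        rw [hpSiftupGo]; simp only [if_neg hcc]
      rw [heq]
      exact hpSiftupLeaf_spec h s p x hp hps hcc A

theorem hpSiftup_spec (h : List Int) (s p : Nat) (x : Int)
    (hp : p < h.length) (hps : hpInS s p = true)
    (A : ∀ j, 0 < j → j < h.length → hpInS s (hpPar j) = true → j ≠ p → hpPar j ≠ p →
        hpGet h (hpPar j) ≤ hpGet h j)
    (C : ∀ j, 0 < j → j < h.length → hpPar j = p → p ≠ s → hpGet h (hpPar p) ≤ hpGet h j) :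
    (∀ j, 0 < j → j < h.length → hpInS s (hpPar j) = true →
        hpGet (hpSiftup h s p x) (hpPar j) ≤ hpGet (hpSiftup h s p x) j) ∧
    (∀ k, hpInS s k = false → hpGet (hpSiftup h s p x) k = hpGet h k) ∧
    (↑(hpSiftup h s p x) : Multiset Int) + {hpGet h p} = ↑h + {x} :=
  hpSiftupGo_spec h.length h s p x (by omega) hp hps A C

theorem hpGet_eq_getElem (l : List Int) (i : Nat) (hi : i < l.length) : hpGet l i = l[i] :=
  List.getD_eq_getElem l 0 hi

theorem hpSiftupTop_spec (h : List Int) (i : Nat) (hi : i < h.length)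
    (H : PartialHeap h (i + 1)) :
    PartialHeap (hpSiftupTop h i) i ∧ (↑(hpSiftupTop h i) : Multiset Int) = ↑h := by
  obtain ⟨ra, rb, rc⟩ := hpSiftup_spec h i i (hpGet h i) hi (hpInS_self i)
    (by
      intro j hj hjl hin hjne hpne
      have h1 := hpInS_le hin
      exact H j hj hjl (by omega))
    (by intro j hj hjl hpar hne; exact absurd rfl hne)
  have hlen : (hpSiftupTop h i).length = h.length := by
    simp [hpSiftupTop, length_hpSiftup]
  constructor
  · intro j hj hjl hge
    rw [hlen] at hjl
    by_cases hin : hpInS i (hpPar j) = true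
    · exact ra j hj hjl hin
    · have hnin : hpInS i (hpPar j) = false := by simpa using hin
      have hjni : hpInS i j = false := by
        by_cases hji : j = i
        · exfalso; have := hpPar_lt hj; omega
        · by_contra hc
          have hc' : hpInS i j = true := by simpa using hc
          rw [hpInS_par hc' hji] at hnin; cases hnin
      rw [hpSiftupTop] at *
      rw [rb j hjni, rb (hpPar j) hnin]
      have hne : hpPar j ≠ i := by intro e; rw [e, hpInS_self] at hnin; cases hnin
      exact H j hj hjl (by omega)
  · have : (↑(hpSiftupTop h i) : Multiset Int) + {hpGet h i} = ↑h + {hpGet h i} := rc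
    exact add_right_cancel this

theorem hpHeapifyGo_spec (i : Nat) : ∀ (h : List Int), 2 * i ≤ h.length → PartialHeap h i →
    IsHeap (hpHeapifyGo h i) ∧ (↑(hpHeapifyGo h i) : Multiset Int) = ↑h := by
  induction i with
  | zero => intro h _ H; exact ⟨H, rfl⟩
  | succ i ih =>
    intro h hle H
    have hi : i < h.length := by omega
    obtain ⟨pa, pm⟩ := hpSiftupTop_spec h i hi H
    have hlen : (hpSiftupTop h i).length = h.length := by simp [hpSiftupTop, length_hpSiftup]
    obtain ⟨qa, qm⟩ := ih (hpSiftupTop h i) (by omega) pa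
    exact ⟨qa, by rw [hpHeapifyGo] at *; rw [qm, pm]⟩

theorem hpHeapify_spec (h : List Int) :
    IsHeap (hpHeapify h) ∧ (↑(hpHeapify h) : Multiset Int) = ↑h := by
  refine hpHeapifyGo_spec (h.length / 2) h (by omega) ?_
  intro j hj hjl hge
  exfalso
  simp only [hpPar] at hge
  omega

theorem isHeap_root_min (h : List Int) (H : IsHeap h) :
    ∀ k, k < h.length → hpGet h 0 ≤ hpGet h k := by
  intro k
  induction k using Nat.strong_induction_on with
  | _ k ih =>
    intro hk
    rcases Nat.eq_zero_or_pos k with rfl | hkpos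
    · exact le_refl _
    · have hpar : hpPar k < k := by simp [hpPar]; have := Nat.div_le_self (k - 1) 2; omega
      exact le_trans (ih (hpPar k) hpar (lt_trans hpar hk)) (H k hkpos hk (Nat.zero_le _))

theorem hpPop_spec (h : List Int) (a : Int) (h' : List Int)
    (H : IsHeap h) (hp : hpPop h = some (a, h')) :
    IsHeap h' ∧ (↑h : Multiset Int) = a ::ₘ ↑h' ∧ (∀ y ∈ h, a ≤ y) := by
  have hmin : ∀ y ∈ h, hpGet h 0 ≤ y := by
    intro y hy
    obtain ⟨k, hk, rfl⟩ := List.mem_iff_getElem.mp hy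
    rw [← hpGet_eq_getElem h k hk]
    exact isHeap_root_min h H k hk
  cases h with
  | nil => simp [hpPop] at hp
  | cons z t =>
    by_cases ht : t = []
    · subst ht
      simp [hpPop] at hp
      obtain ⟨rfl, rfl⟩ := hp
      refine ⟨?_, by simp [hpGet], ?_⟩
      · intro j hj hjl hge
        simp at hjl
      · intro y hy
        simp at hy
        simp [hy, hpGet]
    · -- at least two elements
      set L := z :: t with hL
      have hLne : L ≠ [] := by simp [hL]
      have hn2 : 2 ≤ L.length := by simp [hL]; cases t <;> simp_all
      have hrest : L.dropLast.length = L.length - 1 := by simp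
      have hrne : ¬ L.dropLast.isEmpty := by
        rw [List.isEmpty_iff, ← List.length_eq_zero_iff]
        omega
      have hp' : a = hpGet L.dropLast 0 ∧ h' = hpSiftupTop (L.dropLast.set 0 (L.getLastD 0)) 0 := by
        rw [hpPop] at hp
        rw [if_neg (by simpa using hrne)] at hp
        rw [Option.some.injEq, Prod.mk.injEq] at hp
        exact ⟨hp.1.symm, hp.2.symm⟩
      obtain ⟨ha, hh'⟩ := hp'
      set last := L.getLastD 0 with hlast
      set h2 := L.dropLast.set 0 last with hh2
      have hlen2 : h2.length = L.length - 1 := by simp [hh2, hrest]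
      have hga : a = hpGet L 0 := by
        rw [ha, hpGet, hpGet]
        have h0 : (0:Nat) < L.dropLast.length := by omega
        rw [List.getD_eq_getElem _ 0 h0, List.getD_eq_getElem _ 0 (by omega), List.getElem_dropLast]
      -- heap property of h2 above the root
      have hPH : PartialHeap h2 1 := by
        intro j hj hjl hge
        have hjne : (1:Nat) ≤ hpPar j := hge
        have hjlen : j < L.length - 1 := by omega
        have e1 : hpGet h2 j = hpGet L j := by
          rw [hh2, hpGet_set_ne _ _ _ (by omega), hpGet, hpGet]
          rw [List.getD_eq_getElem _ 0 (by omega), List.getD_eq_getElem _ 0 (by omega),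
            List.getElem_dropLast]
        have e2 : hpGet h2 (hpPar j) = hpGet L (hpPar j) := by
          have hplt : hpPar j < j := hpPar_lt (by omega)
          rw [hh2, hpGet_set_ne _ _ _ (by omega), hpGet, hpGet]
          rw [List.getD_eq_getElem _ 0 (by omega), List.getD_eq_getElem _ 0 (by omega),
            List.getElem_dropLast]
        rw [e1, e2]
        exact H j hj (by omega) (by omega)
      obtain ⟨qa, qm⟩ := hpSiftupTop_spec h2 0 (by omega) hPH
      have hmL : (↑L : Multiset Int) = ↑L.dropLast + {last} := by
        conv_lhs => rw [← List.dropLast_append_getLast hLne]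
        rw [hlast]
        rw [show L.getLastD 0 = L.getLast hLne by
          rw [List.getLastD_eq_getLast?, List.getLast?_eq_getLast hLne]; rfl]
        simp only [← Multiset.coe_add, Multiset.coe_singleton]
      have hms : (↑h2 : Multiset Int) + {a} = ↑L := by
        have := mset_set L.dropLast 0 (by omega) last
        rw [← ha] at this
        rw [hmL]
        rw [← hh2] at this
        rw [this]
      refine ⟨?_, ?_, ?_⟩
      · rw [hh']; exact qa
      · rw [hh', qm, ← hms, ← Multiset.singleton_add]
        abel
      · rw [hga]; exact hmin

theorem hpPush_spec (h : List Int) (x : Int) (H : IsHeap h) :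
    IsHeap (hpPush h x) ∧ (↑(hpPush h x) : Multiset Int) = x ::ₘ ↑h := by
  set L := h ++ [x] with hL
  have hLlen : L.length = h.length + 1 := by simp [hL]
  have hlow : ∀ k, k < h.length → hpGet L k = hpGet h k := by
    intro k hk
    rw [hL, hpGet, hpGet, List.getD_eq_getElem _ 0 (by simp; omega),
      List.getD_eq_getElem _ 0 hk, List.getElem_append_left hk]
  have hch : ∀ j, 0 < j → j < L.length → hpPar j ≠ h.length := by
    intro j hj hjl hpar
    rcases hpPar_children hj hpar with e | e <;> omega
  obtain ⟨ra, rb, rc⟩ := hpSiftdown_spec L 0 h.length x (by omega) (hpInS_zero _)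
    (by
      intro j hj hjl hin hjne hpne
      have hjh : j < h.length := by omega
      have hplt : hpPar j < j := hpPar_lt hj
      rw [hlow j hjh, hlow (hpPar j) (by omega)]
      exact H j hj hjh (by omega))
    (fun j hj hjl hpar => absurd hpar (hch j hj hjl))
    (fun j hj hjl hpar _ => absurd hpar (hch j hj hjl))
  have hlen : (hpPush h x).length = L.length := by
    rw [hpPush, length_hpSiftdown]
  constructor
  · intro j hj hjl hge
    rw [hlen] at hjl
    exact ra j hj hjl (hpInS_zero _)
  · have hgx : hpGet L h.length = x := by simp [hL, hpGet]
    rw [hgx] at rc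
    have hmL : (↑L : Multiset Int) = ↑h + {x} := by
      rw [hL]; simp only [← Multiset.coe_add, Multiset.coe_singleton]
    have : (↑(hpPush h x) : Multiset Int) + {x} = (↑h + {x}) + {x} := by
      rw [hpPush, ← hL, rc, hmL]
    have h2 := add_right_cancel this
    rw [h2, ← Multiset.singleton_add]
    abel

-- B-side: min? with identity key returns the minimum value
theorem min?_id_spec (xs : List Int) (a : Int)
    (h : PySem.List.min? xs (fun x => x) = some a) : a ∈ xs ∧ ∀ y ∈ xs, a ≤ y := by
  refine ⟨PySem.List.min?_mem h, ?_⟩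
  intro y hy
  exact PySem.List.min?_isMin h y hy

theorem hpPop_ne_none (h : List Int) (hne : h ≠ []) : hpPop h ≠ none := by
  cases h with
  | nil => exact absurd rfl hne
  | cons z t => rw [hpPop]; split <;> simp

-- unfolding equations for the two loops
theorem solutionLoopGo_none (fuel : Nat) (h : List Int) (K c : Int) (hq : hpPop h = none) :
    solutionLoopGo (fuel + 1) h K c = 0 := by
  rw [solutionLoopGo]; split <;> simp_all

theorem solutionLoopGo_ret (fuel : Nat) (h : List Int) (K c a : Int) (h1 : List Int)
    (hq : hpPop h = some (a, h1)) (ha : a ≥ K) : solutionLoopGo (fuel + 1) h K c = c := by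
  rw [solutionLoopGo]; split <;> simp_all

theorem solutionLoopGo_neg1 (fuel : Nat) (h : List Int) (K c a : Int) (h1 : List Int)
    (hq : hpPop h = some (a, h1)) (ha : ¬ a ≥ K) (hl : h1.length < 1) :
    solutionLoopGo (fuel + 1) h K c = -1 := by
  rw [solutionLoopGo]; split <;> simp_all

theorem solutionLoopGo_rec (fuel : Nat) (h : List Int) (K c a b : Int) (h1 h2 : List Int)
    (hq : hpPop h = some (a, h1)) (ha : ¬ a ≥ K) (hl : ¬ h1.length < 1)
    (hq2 : hpPop h1 = some (b, h2)) :
    solutionLoopGo (fuel + 1) h K c = solutionLoopGo fuel (hpPush h2 (a + b * 2)) K (c + 1) := by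
  rw [solutionLoopGo]
  split
  · simp_all
  · rename_i a' h1' heq
    rw [hq, Option.some.injEq, Prod.mk.injEq] at heq
    obtain ⟨rfl, rfl⟩ := heq
    rw [if_neg ha, if_neg hl]
    split <;> simp_all

theorem altLoopGo_none (fuel : Nat) (xs : List Int) (K c : Int)
    (hq : PySem.List.min? xs (fun x => x) = none) : altLoopGo (fuel + 1) xs K c = 0 := by
  rw [altLoopGo]; split <;> simp_all

theorem altLoopGo_ret (fuel : Nat) (xs : List Int) (K c a : Int)
    (hq : PySem.List.min? xs (fun x => x) = some a) (ha : a ≥ K) :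
    altLoopGo (fuel + 1) xs K c = c := by
  rw [altLoopGo]; split <;> simp_all

theorem altLoopGo_neg1 (fuel : Nat) (xs : List Int) (K c a : Int)
    (hq : PySem.List.min? xs (fun x => x) = some a) (ha : ¬ a ≥ K) (hl : xs.length < 2) :
    altLoopGo (fuel + 1) xs K c = -1 := by
  rw [altLoopGo]; split <;> simp_all

theorem altLoopGo_rec (fuel : Nat) (xs : List Int) (K c a b : Int) (ys zs : List Int)
    (hq : PySem.List.min? xs (fun x => x) = some a) (ha : ¬ a ≥ K) (hl : ¬ xs.length < 2)
    (hr : PySem.List.remove? xs a = some ys)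
    (hq2 : PySem.List.min? ys (fun x => x) = some b)
    (hr2 : PySem.List.remove? ys b = some zs) :
    altLoopGo (fuel + 1) xs K c = altLoopGo fuel (zs ++ [a + 2 * b]) K (c + 1) := by
  rw [altLoopGo]
  split
  · simp_all
  · rename_i a' heq
    rw [hq, Option.some.injEq] at heq
    subst heq
    rw [if_neg ha, if_neg hl]
    split
    · simp_all
    · rename_i ys' heq2
      rw [hr, Option.some.injEq] at heq2
      subst heq2
      split
      · simp_all
      · rename_i b' heq3
        rw [hq2, Option.some.injEq] at heq3
        subst heq3
        split <;> simp_all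

-- two lists with the same multiset have the same minimum value
theorem min_value_eq (xs ys : List Int) (a b : Int) (hm : (↑xs : Multiset Int) = ↑ys)
    (ha : PySem.List.min? xs (fun x => x) = some a)
    (hb : PySem.List.min? ys (fun x => x) = some b) : a = b := by
  obtain ⟨ham, halow⟩ := min?_id_spec xs a ha
  obtain ⟨hbm, hblow⟩ := min?_id_spec ys b hb
  have h1 : a ∈ ys := by rw [← Multiset.mem_coe, ← hm, Multiset.mem_coe]; exact ham
  have h2 : b ∈ xs := by rw [← Multiset.mem_coe, hm, Multiset.mem_coe]; exact hbm
  exact le_antisymm (halow b h2) (hblow a h1)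

-- the simulation: the heap loop equals the min-scan loop on any list with the same multiset
theorem simGo (fuel : Nat) : ∀ (h xs : List Int) (K c : Int), h.length ≤ fuel → IsHeap h →
    (↑h : Multiset Int) = ↑xs → solutionLoopGo fuel h K c = altLoopGo fuel xs K c := by
  induction fuel with
  | zero => intro h xs K c _ _ _; rfl
  | succ fuel ih =>
  intro h xs K c hlen hH hm
  have hcard : xs.length = h.length := by
    have := congrArg Multiset.card hm; simpa using this.symm
  by_cases hnil : h = []
  · subst hnil
    have hxs : xs = [] := by simpa using hm.symm
    subst hxs
    rw [solutionLoopGo_none fuel _ _ _ rfl, altLoopGo_none fuel _ _ _ (by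
      exact (PySem.List.min?_eq_none_iff _ _).mpr rfl)]
  · cases hq : hpPop h with
    | none => exact absurd hq (hpPop_ne_none h hnil)
    | some p =>
      obtain ⟨a, h1⟩ := p
      obtain ⟨hH1, hm1, hmin⟩ := hpPop_spec h a h1 hH hq
      have hlen1 : h1.length + 1 = h.length := length_hpPop h a h1 hq
      have hxne : xs ≠ [] := by
        intro e; subst e; simp at hcard; exact hnil (List.length_eq_zero_iff.mp hcard.symm)
      cases hmq : PySem.List.min? xs (fun x => x) with
      | none => exact absurd ((PySem.List.min?_eq_none_iff _ _).mp hmq) hxne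
      | some a' =>
        have haa : a' = a := by
          obtain ⟨ham, halow⟩ := min?_id_spec xs a' hmq
          have hax : a ∈ xs := by
            rw [← Multiset.mem_coe, ← hm, hm1]; exact Multiset.mem_cons_self a _
          have hax2 : a' ∈ h := by
            rw [← Multiset.mem_coe, hm, Multiset.mem_coe]; exact ham
          exact le_antisymm (halow a hax) (hmin a' hax2)
        subst haa
        by_cases hak : a' ≥ K
        · rw [solutionLoopGo_ret fuel h K c a' h1 hq hak, altLoopGo_ret fuel xs K c a' hmq hak]
        · by_cases hshort : h1.length < 1
          · rw [solutionLoopGo_neg1 fuel h K c a' h1 hq hak hshort,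
              altLoopGo_neg1 fuel xs K c a' hmq hak (by omega)]
          · have h1ne : h1 ≠ [] := by
              intro e; subst e; simp at hshort
            cases hq2 : hpPop h1 with
            | none => exact absurd hq2 (hpPop_ne_none h1 h1ne)
            | some p2 =>
              obtain ⟨b, h2⟩ := p2
              obtain ⟨hH2, hm2, hmin2⟩ := hpPop_spec h1 b h2 hH1 hq2
              have hax : a' ∈ xs := by
                rw [← Multiset.mem_coe, ← hm, hm1]; exact Multiset.mem_cons_self a' _
              have hrm : PySem.List.remove? xs a' = some (xs.erase a') :=
                PySem.List.remove?_eq_some_erase xs a' hax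
              have hys : (↑(xs.erase a') : Multiset Int) = ↑h1 := by
                rw [← Multiset.coe_erase, ← hm, hm1, Multiset.erase_cons_head]
              have hysl : (xs.erase a').length = h1.length := by
                have := congrArg Multiset.card hys; simpa using this
              have hysne : xs.erase a' ≠ [] := by
                intro e; rw [e] at hysl; simp at hysl; omega
              cases hmq2 : PySem.List.min? (xs.erase a') (fun x => x) with
              | none => exact absurd ((PySem.List.min?_eq_none_iff _ _).mp hmq2) hysne
              | some b' =>
                have hbb : b' = b := by
                  refine min_value_eq (xs.erase a') h1 b' b hys hmq2 ?_
                  · cases hmb : PySem.List.min? h1 (fun x => x) with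
                    | none => exact absurd ((PySem.List.min?_eq_none_iff _ _).mp hmb) h1ne
                    | some bb =>
                      have hbm : b ∈ h1 := by
                        rw [← Multiset.mem_coe, hm2]; exact Multiset.mem_cons_self b _
                      obtain ⟨hbbm, hbblow⟩ := min?_id_spec h1 bb hmb
                      rw [le_antisymm (hbblow b hbm) (hmin2 bb hbbm)]
                subst hbb
                have hbys : b' ∈ xs.erase a' := by
                  rw [← Multiset.mem_coe, hys, hm2]; exact Multiset.mem_cons_self b' _
                have hrm2 : PySem.List.remove? (xs.erase a') b' = some ((xs.erase a').erase b') :=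
                  PySem.List.remove?_eq_some_erase _ b' hbys
                have hzs : (↑((xs.erase a').erase b') : Multiset Int) = ↑h2 := by
                  rw [← Multiset.coe_erase, hys, hm2, Multiset.erase_cons_head]
                rw [solutionLoopGo_rec fuel h K c a' b' h1 h2 hq hak hshort hq2,
                  altLoopGo_rec fuel xs K c a' b' (xs.erase a') ((xs.erase a').erase b') hmq hak
                    (by omega) hrm hmq2 hrm2]
                have hplen : (hpPush h2 (a' + b' * 2)).length = h.length - 1 := by
                  have e1 := length_hpPush h2 (a' + b' * 2)
                  have e2 := length_hpPop h1 b' h2 hq2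
                  omega
                refine ih _ _ K (c + 1) (by omega)
                  (hpPush_spec h2 (a' + b' * 2) hH2).1 ?_
                rw [(hpPush_spec h2 (a' + b' * 2) hH2).2]
                have : (↑((xs.erase a').erase b' ++ [a' + 2 * b']) : Multiset Int)
                    = (a' + 2 * b') ::ₘ ↑((xs.erase a').erase b') := by
                  simp only [← Multiset.coe_add, ← Multiset.singleton_add, Multiset.coe_singleton]
                  abel
                rw [this, hzs, Int.mul_comm]

theorem sim (h xs : List Int) (K c : Int) (hH : IsHeap h)
    (hm : (↑h : Multiset Int) = ↑xs) : solutionLoop h K c = altLoop xs K c := by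
  have hcard : xs.length = h.length := by
    have := congrArg Multiset.card hm; simpa using this.symm
  rw [solutionLoop, altLoop, hcard]
  exact simGo h.length h xs K c (le_refl _) hH hm

-- ===== VERDICT (by name: the statement is the Claim_ definition above) =====
theorem solution_spec : Claim_equal_solution := by
  intro scoville K _ _
  unfold Spec_solution solution solution_alt
  obtain ⟨hh, hm⟩ := hpHeapify_spec scoville
  exact sim (hpHeapify scoville) scoville K 0 hh hm
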